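-- pv_equiv track=rewrite | github.com/Spiderasasen/algorithms-with-python | sorting/heaps.py | min_heap_steps
-- ===== SOURCE A (Python) =====
-- from typing import List, Generator, Tuple
--
-- def min_heapify(array: List[int], n: int, i: int) -> Generator[Tuple[List, int, int], None, None]:
--     smallest = i
--     left: int = 2*i + 1
--     right: int = 2*i + 2
--
--     if left < n: #comparing to the left parent
--         yield (array.copy(), i, left)
--         if array[left] < array[smallest]:
--             smallest = left
--
--     if right < n: #comparing to the right parent
--         yield (array.copy(), i, right)
--         if array[right] < array[smallest]:
--             smallest = right
--     if smallest != i: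
--         array[i], array[smallest] = array[smallest], array[i]
--         yield(array.copy(), i, smallest)
--         yield from min_heapify(array, n, smallest)
--
-- def min_heap_steps(array: List[int]) -> Generator[Tuple[List, int, int], None, None]:
--     n = len(array)
--     for i in range(n // 2 - 1, -1, -1):
--         yield from min_heapify(array, n, i)
--
--     for i in range(n - 1, 0, -1):
--         array[0], array[i] = array[i], array[0]
--         yield (array.copy(), 0, i)
--         yield from min_heapify(array, i, 0)
-- ===== SOURCE B (Python) =====
-- def _sift(array, n, i):
--     """Iterative sift-down: collect the comparison/swap steps as a list."""
--     out = []
--     while True: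
--         smallest = i
--         left = 2 * i + 1
--         right = 2 * i + 2
--         if left < n:
--             out.append((array.copy(), i, left))
--             if array[left] < array[smallest]:
--                 smallest = left
--         if right < n:
--             out.append((array.copy(), i, right))
--             if array[right] < array[smallest]:
--                 smallest = right
--         if smallest == i:
--             return out
--         array[i], array[smallest] = array[smallest], array[i]
--         out.append((array.copy(), i, smallest))
--         i = smallest
--
-- def min_heap_steps(array):
--     n = len(array)
--     out = []
--     i = n // 2 - 1
--     while i >= 0:
--         out.extend(_sift(array, n, i))
--         i -= 1
--     end = n - 1
--     while end > 0:
--         array[0], array[end] = array[end], array[0]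
--         out.append((array.copy(), 0, end))
--         out.extend(_sift(array, end, 0))
--         end -= 1
--     yield from out
-- ===== Notes on version B (the rewrite author's own statement) =====
-- stated objective: alternative
-- what changed: min_heapify's tail recursion and generator yields are replaced by an explicit iterative sift-down loop with a mutable index and an accumulated step list; the outer for-loops become counting while-loops that extend the accumulator.
import Mathlib
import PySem

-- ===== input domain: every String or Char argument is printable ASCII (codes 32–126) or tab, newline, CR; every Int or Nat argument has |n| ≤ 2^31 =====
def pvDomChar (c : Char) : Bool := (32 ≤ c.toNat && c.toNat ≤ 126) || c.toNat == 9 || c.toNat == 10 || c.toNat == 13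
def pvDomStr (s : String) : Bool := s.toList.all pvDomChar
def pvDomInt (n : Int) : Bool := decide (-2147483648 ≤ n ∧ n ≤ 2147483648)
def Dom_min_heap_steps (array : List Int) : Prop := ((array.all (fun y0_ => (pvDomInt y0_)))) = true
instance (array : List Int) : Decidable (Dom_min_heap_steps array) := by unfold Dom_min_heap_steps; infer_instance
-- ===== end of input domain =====

-- B replaces min_heapify's tail recursion + generator yields by an explicit iterative
-- sift-down loop with an accumulated step list (alternative decomposition, same cost).
-- Both A and B mutate the caller's list in Python; the equivalence proved here is about
-- the yielded step sequence (the return value), which is identical.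

-- ===== PORT A =====
-- index accesses: every call site has the index < n ≤ array.length, so getD is exact
def pvGet (arr : List Int) (i : Nat) : Int := arr.getD i 0
def pvSwap (arr : List Int) (i j : Nat) : List Int :=
  (arr.set i (pvGet arr j)).set j (pvGet arr i)

-- min_heapify: the recursion depth is ≤ heap size (the index strictly grows and stays < n),
-- so a fuel of n+1 (as passed at every call site) makes the recursion structural; the fuel-0
-- arm is unreachable on those calls.
def heapifyA : Nat → List Int → Nat → Nat → List (List Int × Int × Int) × List Int
  | 0, arr, _, _ => ([], arr)
  | fuel+1, arr, n, i =>
    let l := 2*i+1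
    let r := 2*i+2
    let s1 : List (List Int × Int × Int) := if l < n then [(arr, (i:Int), (l:Int))] else []
    let m1 := if l < n then (if pvGet arr l < pvGet arr i then l else i) else i
    let s2 : List (List Int × Int × Int) := if r < n then [(arr, (i:Int), (r:Int))] else []
    let m2 := if r < n then (if pvGet arr r < pvGet arr m1 then r else m1) else m1
    if m2 ≠ i then
      let arr' := pvSwap arr i m2
      let (rest, arrF) := heapifyA fuel arr' n m2
      (s1 ++ s2 ++ (arr', (i:Int), (m2:Int)) :: rest, arrF)
    else (s1 ++ s2, arr)

-- body of A's first for-loop (yield from min_heapify(array, n, i))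
def stepA1 (n : Nat) (st : List (List Int × Int × Int) × List Int) (i : Int) :
    List (List Int × Int × Int) × List Int :=
  let (s, a) := st
  let (s', a') := heapifyA (n+1) a n i.toNat
  (s ++ s', a')

-- body of A's second for-loop (swap, yield, yield from min_heapify(array, i, 0))
def stepA2 (st : List (List Int × Int × Int) × List Int) (i : Int) :
    List (List Int × Int × Int) × List Int :=
  let (s, a) := st
  let a1 := pvSwap a 0 i.toNat
  let (s', a2) := heapifyA (i.toNat+1) a1 i.toNat 0
  (s ++ [(a1, (0:Int), i)] ++ s', a2)

def min_heap_steps (array : List Int) : List (List Int × Int × Int) :=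
  let n := array.length
  let st1 := (PySem.List.pyRange (PySem.Int.floordiv (n:Int) 2 - 1) (-1) (-1)).foldl (stepA1 n) ([], array)
  let st2 := (PySem.List.pyRange ((n:Int) - 1) 0 (-1)).foldl stepA2 st1
  st2.1

-- ===== PORT B =====
-- iterative sift-down: while-loop (fuel, unreachable 0-arm as above) with accumulator acc
def siftB : Nat → List Int → Nat → Nat → List (List Int × Int × Int) →
    List (List Int × Int × Int) × List Int
  | 0, arr, _, _, acc => (acc, arr)
  | fuel+1, arr, n, i, acc =>
    let l := 2*i+1
    let r := 2*i+2
    let acc1 := if l < n then acc ++ [(arr, (i:Int), (l:Int))] else acc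
    let m1 := if l < n then (if pvGet arr l < pvGet arr i then l else i) else i
    let acc2 := if r < n then acc1 ++ [(arr, (i:Int), (r:Int))] else acc1
    let m2 := if r < n then (if pvGet arr r < pvGet arr m1 then r else m1) else m1
    if m2 = i then (acc2, arr)
    else
      let arr' := pvSwap arr i m2
      siftB fuel arr' n m2 (acc2 ++ [(arr', (i:Int), (m2:Int))])

-- 'i = n//2 - 1; while i >= 0: …; i -= 1' as a countdown on k = i+1
def phase1B : Nat → List Int → Nat → List (List Int × Int × Int) →
    List (List Int × Int × Int) × List Int
  | 0, arr, _, acc => (acc, arr)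
  | k+1, arr, n, acc =>
    let (acc', arr') := siftB (n+1) arr n k acc
    phase1B k arr' n acc'

-- 'end = n - 1; while end > 0: …; end -= 1' as a countdown on end
def phase2B : Nat → List Int → List (List Int × Int × Int) →
    List (List Int × Int × Int) × List Int
  | 0, arr, acc => (acc, arr)
  | e+1, arr, acc =>
    let arr1 := pvSwap arr 0 (e+1)
    let (acc', arr2) := siftB (e+2) arr1 (e+1) 0 (acc ++ [(arr1, (0:Int), ((e:Int)+1))])
    phase2B e arr2 acc'

def min_heap_steps_alt (array : List Int) : List (List Int × Int × Int) :=
  let n := array.length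
  let (acc1, a1) := phase1B (n/2) array n []
  let (acc2, _) := phase2B (n-1) a1 acc1
  acc2

-- ===== PRECONDITION & SPEC =====
def Spec_min_heap_steps (array : List Int) (out : List (List Int × Int × Int)) : Prop := out = min_heap_steps_alt array
instance (array : List Int) (out : List (List Int × Int × Int)) : Decidable (Spec_min_heap_steps array out) := by unfold Spec_min_heap_steps; infer_instance

-- ===== CLAIM (what is proved, stated in full; the proofs are below) =====
def Claim_equal_min_heap_steps : Prop := ∀ (array : List Int), Dom_min_heap_steps array → Spec_min_heap_steps array (min_heap_steps array)

-- ===== LEMMAS AND PROOFS =====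

theorem sift_eq (fuel : Nat) : ∀ (arr : List Int) (n i : Nat) (acc : List (List Int × Int × Int)),
    siftB fuel arr n i acc = (acc ++ (heapifyA fuel arr n i).1, (heapifyA fuel arr n i).2) := by
  induction fuel with
  | zero => intro arr n i acc; simp [siftB, heapifyA]
  | succ f ih =>
    intro arr n i acc
    simp only [siftB, heapifyA]
    split_ifs <;> simp_all [List.append_assoc]

theorem phase1_eq (n : Nat) : ∀ (k : Nat) (arr : List Int) (s0 : List (List Int × Int × Int)),
    (PySem.List.pyRange ((k:Int) - 1) (-1) (-1)).foldl (stepA1 n) (s0, arr) = phase1B k arr n s0 := by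
  intro k
  induction k with
  | zero =>
    intro arr s0
    rw [PySem.List.pyRange_neg_one_eq_nil (by omega)]
    simp [phase1B]
  | succ m ih =>
    intro arr s0
    rw [show ((m+1:Nat):Int) - 1 = (m:Int) by push_cast; ring]
    rw [PySem.List.pyRange_neg_one_cons (by omega)]
    simp only [List.foldl_cons, stepA1, Int.toNat_natCast]
    cases hA : heapifyA (n+1) arr n m with
    | mk s' a' =>
      simp only [phase1B, sift_eq, hA]
      exact ih a' (s0 ++ s')

theorem phase2_eq : ∀ (e : Nat) (arr : List Int) (s0 : List (List Int × Int × Int)),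
    (PySem.List.pyRange ((e:Int)) 0 (-1)).foldl stepA2 (s0, arr) = phase2B e arr s0 := by
  intro e
  induction e with
  | zero =>
    intro arr s0
    rw [PySem.List.pyRange_neg_one_eq_nil (by omega)]
    simp [phase2B]
  | succ m ih =>
    intro arr s0
    rw [PySem.List.pyRange_neg_one_cons (by omega)]
    simp only [List.foldl_cons, stepA2, Int.toNat_natCast]
    cases hA : heapifyA ((m+1)+1) (pvSwap arr 0 (m+1)) (m+1) 0 with
    | mk s' a' =>
      have hcast : ((m:Int)+1) = (((m+1:Nat)):Int) := by push_cast; ring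
      simp only [phase2B, sift_eq, hA]
      rw [show (((m+1:Nat)):Int) - 1 = (m:Int) by push_cast; ring]
      simp only [hcast]
      exact ih a' _

-- ===== VERDICT (by name: the statement is the Claim_ definition above) =====
theorem min_heap_steps_spec : Claim_equal_min_heap_steps := by
  unfold Claim_equal_min_heap_steps Spec_min_heap_steps
  intro array _
  unfold min_heap_steps min_heap_steps_alt
  dsimp only
  rw [show PySem.Int.floordiv ((array.length:Int)) 2 = ((array.length/2 : Nat):Int) from
        PySem.Int.floordiv_natCast _ _]
  rw [phase1_eq]
  cases hp : phase1B (array.length/2) array array.length [] with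
  | mk acc1 a1 =>
    by_cases hn : array.length = 0
    · rw [hn]
      rw [PySem.List.pyRange_neg_one_eq_nil (by omega)]
      simp [phase2B, hn] at hp ⊢
    · rw [show ((array.length:Int) - 1) = ((array.length - 1 : Nat):Int) by omega]
      rw [phase2_eq]
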